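-- pv_equiv track=rewrite | github.com/tianjiansmile/ML_filght | com/untils/loan_history_utils.py | split_record_by_type
-- ===== SOURCE A (Python) =====
-- def split_record_by_type(dt, p_type):
--     type_dict = dict()
--     for row in dt:
--         if row[p_type] == 2:
--             if type_dict.get('int'):
--                 type_dict['int'].append(row)
--             else:
--                 type_dict['int'] = []
--                 type_dict['int'].append(row)
--         else:
--             if type_dict.get('pdl'):
--                 type_dict['pdl'].append(row)
--             else:
--                 type_dict['pdl'] = []
--                 type_dict['pdl'].append(row)
--
--     return type_dict
-- ===== SOURCE B (Python) =====
-- def split_record_by_type(dt, p_type):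
--     dt = list(dt)
--     names = ['int' if row[p_type] == 2 else 'pdl' for row in dt]
--     return {name: [row for row, n in zip(dt, names) if n == name]
--             for name in dict.fromkeys(names)}
-- ===== Notes on version B (the rewrite author's own statement) =====
-- stated objective: simpler
-- what changed: A builds the result dict in one interleaved pass with per-key present/absent branching; B computes each row's group name once, deduplicates the names in first-occurrence order (dict.fromkeys) and builds the result as a grouping dict comprehension, which omits empty groups and preserves A's key order automatically.
import Mathlib
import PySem

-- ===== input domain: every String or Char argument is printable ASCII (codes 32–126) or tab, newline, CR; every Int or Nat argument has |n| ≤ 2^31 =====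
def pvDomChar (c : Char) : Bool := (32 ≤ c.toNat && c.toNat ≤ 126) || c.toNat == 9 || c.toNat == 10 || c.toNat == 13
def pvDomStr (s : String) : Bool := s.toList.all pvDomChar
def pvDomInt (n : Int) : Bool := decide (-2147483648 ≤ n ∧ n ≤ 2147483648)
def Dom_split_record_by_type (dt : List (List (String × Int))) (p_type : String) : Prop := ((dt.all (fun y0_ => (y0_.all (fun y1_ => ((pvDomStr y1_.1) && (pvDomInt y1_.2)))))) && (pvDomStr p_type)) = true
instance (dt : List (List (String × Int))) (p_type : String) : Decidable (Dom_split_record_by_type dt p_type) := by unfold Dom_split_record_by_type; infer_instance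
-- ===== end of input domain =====

-- B replaces A's interleaved dict-building pass by a grouping comprehension over the
-- first-occurrence-deduplicated list of group names (objective: simpler).


-- ===== PORT A =====
-- row[p_type] : rows are Python dicts, encoded as association lists (last binding wins,
-- as in a Python dict built from those pairs). Total via the default 0; exact under
-- Pre_split_record_by_type, which guarantees the key is present (Python raises KeyError otherwise).
def pvRowVal (row : List (String × Int)) (p_type : String) : Int :=
  (PySem.Dict.ofList row).getD p_type 0

def split_record_by_type (dt : List (List (String × Int))) (p_type : String) : List (String × List (List (String × Int))) :=
  (dt.foldl (fun type_dict row =>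
      if pvRowVal row p_type = 2 then
        -- if type_dict.get('int'):  (truthy = present and non-empty)
        if (type_dict.getD "int" []) ≠ [] then
          type_dict.insert "int" ((type_dict.getD "int" []) ++ [row])
        else
          type_dict.insert "int" ([] ++ [row])
      else
        if (type_dict.getD "pdl" []) ≠ [] then
          type_dict.insert "pdl" ((type_dict.getD "pdl" []) ++ [row])
        else
          type_dict.insert "pdl" ([] ++ [row]))
    (PySem.Dict.empty : PySem.Dict String (List (List (String × Int))))).items

-- ===== PORT B =====
def split_record_by_type_alt (dt : List (List (String × Int))) (p_type : String) : List (String × List (List (String × Int))) :=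
  let names := dt.map (fun row => if pvRowVal row p_type = 2 then "int" else "pdl")
  (PySem.List.dedup names).map (fun name =>
    (name, ((dt.zip names).filter (fun p => p.2 == name)).map (·.1)))

-- ===== PRECONDITION & SPEC =====
-- Pre_ excludes exactly the inputs on which Python A raises KeyError: a row without the key p_type.
def Pre_split_record_by_type (dt : List (List (String × Int))) (p_type : String) : Prop :=
  ∀ row ∈ dt, p_type ∈ row.map Prod.fst
instance (dt : List (List (String × Int))) (p_type : String) : Decidable (Pre_split_record_by_type dt p_type) := by unfold Pre_split_record_by_type; infer_instance

def pvWitness_split_record_by_type : (List (List (String × Int))) × String :=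
  ([[("type", 2)], [("type", 1)], [("type", 2)]], "type")

def Spec_split_record_by_type (dt : List (List (String × Int))) (p_type : String) (out : List (String × List (List (String × Int)))) : Prop := out = split_record_by_type_alt dt p_type
instance (dt : List (List (String × Int))) (p_type : String) (out : List (String × List (List (String × Int)))) : Decidable (Spec_split_record_by_type dt p_type out) := by unfold Spec_split_record_by_type; infer_instance

-- ===== CLAIM (what is proved, stated in full; the proofs are below) =====
def Claim_equal_split_record_by_type : Prop := ∀ (dt : List (List (String × Int))) (p_type : String), Dom_split_record_by_type dt p_type → Pre_split_record_by_type dt p_type → Spec_split_record_by_type dt p_type (split_record_by_type dt p_type)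

-- ===== LEMMAS AND PROOFS =====

-- the group name of a row
def pvNm (p_type : String) (row : List (String × Int)) : String :=
  if pvRowVal row p_type = 2 then "int" else "pdl"

-- the group of rows named n, and the canonical result both ports compute
def pvGrp (p_type : String) (l : List (List (String × Int))) (n : String) : List (List (String × Int)) :=
  l.filter (fun r => pvNm p_type r == n)

def pvSpec (p_type : String) (l : List (List (String × Int))) : List (String × List (List (String × Int))) :=
  (PySem.List.dedup (l.map (pvNm p_type))).map (fun n => (n, pvGrp p_type l n))

lemma zip_filter_map (l : List (List (String × Int))) (f : List (String × Int) → String) (n : String) :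
    ((l.zip (l.map f)).filter (fun p => p.2 == n)).map (·.1) = l.filter (fun r => f r == n) := by
  induction l with
  | nil => rfl
  | cons x xs ih =>
    simp only [List.map_cons, List.zip_cons_cons, List.filter_cons]
    by_cases h : f x == n <;> simp [h, ih]

lemma alt_eq_pvSpec (dt : List (List (String × Int))) (p_type : String) :
    split_record_by_type_alt dt p_type = pvSpec p_type dt := by
  unfold split_record_by_type_alt pvSpec pvGrp
  simp only [zip_filter_map]
  rfl

lemma pvGrp_append_singleton (p_type : String) (l : List (List (String × Int))) (x : List (String × Int)) (m : String) :
    pvGrp p_type (l ++ [x]) m = pvGrp p_type l m ++ (if pvNm p_type x == m then [x] else []) := by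
  unfold pvGrp
  rw [List.filter_append]
  cases h : (pvNm p_type x == m) <;> simp [List.filter, h]

lemma pvSpec_keys (p_type : String) (l : List (List (String × Int))) :
    (pvSpec p_type l).map Prod.fst = PySem.List.dedup (l.map (pvNm p_type)) := by
  unfold pvSpec
  rw [List.map_map]
  simp [Function.comp_def]

lemma mk_pvSpec_getD_of_mem (p_type : String) (l : List (List (String × Int))) (n : String)
    (h : n ∈ l.map (pvNm p_type)) :
    (PySem.Dict.mk (pvSpec p_type l)).getD n [] = pvGrp p_type l n := by
  apply PySem.Dict.getD_of_mem_items
  · show (n, pvGrp p_type l n) ∈ pvSpec p_type l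
    unfold pvSpec
    exact List.mem_map_of_mem (by simpa using h)
  · show ((PySem.Dict.mk (pvSpec p_type l)).keys).Nodup
    have : (PySem.Dict.mk (pvSpec p_type l)).keys = (pvSpec p_type l).map Prod.fst := rfl
    rw [this, pvSpec_keys]
    exact PySem.List.nodup_dedup _

lemma mk_pvSpec_contains (p_type : String) (l : List (List (String × Int))) (n : String) :
    (PySem.Dict.mk (pvSpec p_type l)).contains n = decide (n ∈ l.map (pvNm p_type)) := by
  rw [PySem.Dict.contains_eq_decide_mem_keys]
  have : (PySem.Dict.mk (pvSpec p_type l)).keys = (pvSpec p_type l).map Prod.fst := rfl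
  rw [this, pvSpec_keys]
  simp

-- one step of A's loop, on the canonical state, for the key n = pvNm p_type x
lemma step_spec (p_type : String) (l : List (List (String × Int))) (x : List (String × Int)) (n : String)
    (hn : pvNm p_type x = n) :
    (if (PySem.Dict.mk (pvSpec p_type l)).getD n [] ≠ [] then
       (PySem.Dict.mk (pvSpec p_type l)).insert n ((PySem.Dict.mk (pvSpec p_type l)).getD n [] ++ [x])
     else
       (PySem.Dict.mk (pvSpec p_type l)).insert n ([] ++ [x]))
    = PySem.Dict.mk (pvSpec p_type (l ++ [x])) := by
  by_cases hmem : n ∈ l.map (pvNm p_type)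
  · -- key already present: its group is non-empty, A appends to it
    have hget := mk_pvSpec_getD_of_mem p_type l n hmem
    have hne : pvGrp p_type l n ≠ [] := by
      obtain ⟨r, hr, hrn⟩ := List.mem_map.mp hmem
      have : r ∈ pvGrp p_type l n := List.mem_filter.mpr ⟨hr, by simp [hrn]⟩
      exact fun h0 => by simp [h0] at this
    rw [hget, if_pos hne]
    apply PySem.Dict.ext
    rw [PySem.Dict.items_insert_of_contains _ _ (by rw [mk_pvSpec_contains]; simp only [decide_eq_true_eq]; exact hmem)]
    show (pvSpec p_type l).map _ = pvSpec p_type (l ++ [x])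
    unfold pvSpec
    rw [List.map_append, PySem.List.dedup_eq_ofList, PySem.List.dedup_eq_ofList]
    simp only [List.map_cons, List.map_nil]
    rw [PySem.Set.ofList_append_singleton, hn, PySem.Set.add_of_mem (by simpa using hmem),
        List.map_map]
    apply List.map_congr_left
    intro m _
    by_cases hm : m = n
    · subst hm; simp [pvGrp_append_singleton, hn]
    · simp [Function.comp, pvGrp_append_singleton, hn,
        show ¬ (m == n) = true by simpa using hm, show ¬ (n == m) = true by simpa using (Ne.symm hm)]
  · -- fresh key: A initialises it with [x], appended at the end
    have hc : (PySem.Dict.mk (pvSpec p_type l)).contains n = false := by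
      rw [mk_pvSpec_contains]; simpa using hmem
    have hget : (PySem.Dict.mk (pvSpec p_type l)).getD n [] = [] :=
      PySem.Dict.getD_of_not_contains _ _ hc
    rw [hget, if_neg (by simp)]
    apply PySem.Dict.ext
    rw [PySem.Dict.items_insert_of_not_contains _ _ hc]
    show pvSpec p_type l ++ [(n, [] ++ [x])] = pvSpec p_type (l ++ [x])
    have hgrpn : pvGrp p_type l n = [] := by
      apply List.filter_eq_nil_iff.mpr
      intro r hr hrn
      exact hmem (List.mem_map.mpr ⟨r, hr, by simpa using hrn⟩)
    unfold pvSpec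
    rw [List.map_append, PySem.List.dedup_eq_ofList, PySem.List.dedup_eq_ofList]
    simp only [List.map_cons, List.map_nil]
    rw [PySem.Set.ofList_append_singleton, hn, PySem.Set.add_of_not_mem (by simpa using hmem),
        List.map_append]
    congr 1
    · apply List.map_congr_left
      intro m hm
      have hmn : m ≠ n := by
        intro h; subst h
        exact hmem ((PySem.Set.mem_ofList _ _).mp hm)
      simp [pvGrp_append_singleton, hn, show ¬ (n == m) = true by simpa using (Ne.symm hmn)]
    · simp [pvGrp_append_singleton, hn, hgrpn]

lemma foldl_eq_pvSpec (p_type : String) (dt : List (List (String × Int))) :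
    dt.foldl (fun type_dict row =>
      if pvRowVal row p_type = 2 then
        if (type_dict.getD "int" []) ≠ [] then
          type_dict.insert "int" ((type_dict.getD "int" []) ++ [row])
        else
          type_dict.insert "int" ([] ++ [row])
      else
        if (type_dict.getD "pdl" []) ≠ [] then
          type_dict.insert "pdl" ((type_dict.getD "pdl" []) ++ [row])
        else
          type_dict.insert "pdl" ([] ++ [row]))
      (PySem.Dict.empty : PySem.Dict String (List (List (String × Int))))
    = PySem.Dict.mk (pvSpec p_type dt) := by
  induction dt using List.reverseRecOn with
  | nil => rfl
  | append_singleton l x ih =>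
    rw [List.foldl_append, List.foldl_cons, List.foldl_nil, ih]
    by_cases h2 : pvRowVal x p_type = 2
    · rw [if_pos h2]
      exact step_spec p_type l x "int" (by simp [pvNm, h2])
    · rw [if_neg h2]
      exact step_spec p_type l x "pdl" (by simp [pvNm, h2])

-- ===== VERDICT (by name: the statement is the Claim_ definition above) =====
theorem split_record_by_type_spec : Claim_equal_split_record_by_type := by
  intro dt p_type _ _
  show split_record_by_type dt p_type = split_record_by_type_alt dt p_type
  rw [alt_eq_pvSpec]
  unfold split_record_by_type
  rw [foldl_eq_pvSpec]
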